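-- pv_equiv track=rewrite | github.com/ferhatelmas/algo | topCoder/srms/200s/srm292/div2/fowl_road.py | crossings
-- ===== SOURCE A (Python) =====
-- def crossings(roadY, bobX, bobY):
--     c, f = 0, 0
--     for e in map(lambda e: e - roadY, bobY):
--         if e < 0 and f > 0 or (e > 0 and f < 0):
--             c += 1
--             f = e
--         elif e != 0 and f == 0:
--             f = e
--     return c
-- ===== SOURCE B (Python) =====
-- def crossings(roadY, bobX, bobY):
--     signs = [1 if y > roadY else -1 for y in bobY if y != roadY]
--     return sum(1 for a, b in zip(signs, signs[1:]) if a != b)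
-- ===== Notes on version B (the rewrite author's own statement) =====
-- stated objective: simpler
-- what changed: Replaces the stateful single pass tracking the last nonzero offset in f with a two-phase pipeline: project/filter to a list of signs, then count adjacent sign changes pairwise.
import Mathlib
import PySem

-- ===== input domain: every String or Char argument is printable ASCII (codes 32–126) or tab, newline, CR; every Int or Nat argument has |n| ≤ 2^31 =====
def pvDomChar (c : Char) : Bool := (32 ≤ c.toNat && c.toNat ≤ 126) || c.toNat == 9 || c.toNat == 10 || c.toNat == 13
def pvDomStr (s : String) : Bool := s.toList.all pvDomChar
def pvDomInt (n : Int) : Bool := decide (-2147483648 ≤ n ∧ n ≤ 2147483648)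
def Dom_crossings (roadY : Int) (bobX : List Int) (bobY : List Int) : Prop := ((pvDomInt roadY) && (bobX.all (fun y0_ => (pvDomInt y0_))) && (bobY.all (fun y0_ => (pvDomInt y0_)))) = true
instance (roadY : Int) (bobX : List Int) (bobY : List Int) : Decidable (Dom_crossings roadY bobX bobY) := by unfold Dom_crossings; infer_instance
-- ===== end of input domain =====

-- B replaces A's stateful single pass (last nonzero offset kept in f) by a sign-list
-- projection followed by a pairwise adjacent-change count; objective: simpler.

-- ===== PORT A =====
-- one loop step over e = y - roadY with state (c, f), branches in A's order
def crossingsStep (st : Int × Int) (e : Int) : Int × Int :=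
  if (e < 0 ∧ st.2 > 0) ∨ (e > 0 ∧ st.2 < 0) then (st.1 + 1, e)
  else if e ≠ 0 ∧ st.2 = 0 then (st.1, e)
  else st

def crossings (roadY : Int) (bobX : List Int) (bobY : List Int) : Int :=
  ((bobY.map (fun e => e - roadY)).foldl crossingsStep (0, 0)).1

-- ===== PORT B =====
-- sum(1 for a, b in zip(signs, signs[1:]) if a != b)
def countAdjChanges : List Int → Int
  | a :: b :: t => (if a ≠ b then 1 else 0) + countAdjChanges (b :: t)
  | _ => 0

def crossings_alt (roadY : Int) (bobX : List Int) (bobY : List Int) : Int :=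
  let signs := bobY.filterMap (fun y => if y ≠ roadY then some (if y > roadY then (1 : Int) else -1) else none)
  countAdjChanges signs

-- ===== PRECONDITION & SPEC =====
def Spec_crossings (roadY : Int) (bobX : List Int) (bobY : List Int) (out : Int) : Prop := out = crossings_alt roadY bobX bobY
instance (roadY : Int) (bobX : List Int) (bobY : List Int) (out : Int) : Decidable (Spec_crossings roadY bobX bobY out) := by unfold Spec_crossings; infer_instance

-- ===== CLAIM (what is proved, stated in full; the proofs are below) =====
def Claim_equal_crossings : Prop := ∀ (roadY : Int) (bobX : List Int) (bobY : List Int), Dom_crossings roadY bobX bobY → Spec_crossings roadY bobX bobY (crossings roadY bobX bobY)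

-- ===== LEMMAS AND PROOFS =====

lemma countAdjChanges_nil : countAdjChanges [] = 0 := rfl
lemma countAdjChanges_single (a : Int) : countAdjChanges [a] = 0 := rfl
lemma countAdjChanges_cons₂ (a b : Int) (t : List Int) :
    countAdjChanges (a :: b :: t) = (if a ≠ b then 1 else 0) + countAdjChanges (b :: t) := rfl

-- B's sign list, expressed over the offset list e = y - roadY
def offSigns : List Int → List Int
  | [] => []
  | e :: t => if e ≠ 0 then (if e > 0 then (1 : Int) else -1) :: offSigns t else offSigns t

lemma offSigns_eq_filterMap (roadY : Int) (ys : List Int) :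
    offSigns (ys.map (fun e => e - roadY))
      = ys.filterMap (fun y => if y ≠ roadY then some (if y > roadY then (1 : Int) else -1) else none) := by
  induction ys with
  | nil => rfl
  | cons y t ih =>
    simp only [List.map_cons, List.filterMap_cons, offSigns]
    by_cases h : y = roadY
    · simp [h, ih]
    · have h1 : y - roadY ≠ 0 := by omega
      have h2 : (y - roadY > 0) = (y > roadY) := by
        apply propext; omega
      simp [h, h1, ih]

-- invariant for A's loop once f is nonzero: f's sign is the head of the pending sign list
lemma foldA_nonzero (es : List Int) : ∀ c f : Int, f ≠ 0 →
    (es.foldl crossingsStep (c, f)).1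
      = c + countAdjChanges ((if f > 0 then (1 : Int) else -1) :: offSigns es) := by
  induction es with
  | nil => intro c f _; simp [offSigns, countAdjChanges_single]
  | cons e t ih =>
    intro c f hf
    simp only [List.foldl_cons, crossingsStep, offSigns]
    by_cases he : e = 0
    · have : ¬ ((e < 0 ∧ f > 0) ∨ (e > 0 ∧ f < 0)) := by omega
      simp [he, ih c f hf]
    · by_cases hcross : (e < 0 ∧ f > 0) ∨ (e > 0 ∧ f < 0)
      · have hfe : e ≠ 0 := he
        rw [if_pos hcross]
        rw [ih (c + 1) e hfe]
        have hne : (if f > 0 then (1 : Int) else -1) ≠ (if e > 0 then (1 : Int) else -1) := by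
          rcases hcross with ⟨h1, h2⟩ | ⟨h1, h2⟩
          · simp only [if_pos h2, if_neg (show ¬ e > 0 by omega)]; decide
          · simp only [if_neg (show ¬ f > 0 by omega), if_pos h1]; decide
        simp only [he, ne_eq, countAdjChanges_cons₂, hne, not_false_eq_true, if_pos]
        ring
      · -- same sign: state unchanged, head sign unchanged
        rw [if_neg hcross, if_neg (by simp [hf])]
        rw [ih c f hf]
        have hsame : (if f > 0 then (1 : Int) else -1) = (if e > 0 then (1 : Int) else -1) := by
          by_cases hfpos : f > 0
          · have : e > 0 := by omega
            simp [hfpos, this]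
          · have : ¬ e > 0 := by omega
            simp [hfpos, this]
        simp [he, countAdjChanges_cons₂, ← hsame]

lemma foldA_zero (es : List Int) : ∀ c : Int,
    (es.foldl crossingsStep (c, 0)).1 = c + countAdjChanges (offSigns es) := by
  induction es with
  | nil => intro c; simp [offSigns, countAdjChanges_nil]
  | cons e t ih =>
    intro c
    rw [List.foldl_cons]
    by_cases he : e = 0
    · rw [show crossingsStep (c, 0) e = (c, 0) from by simp [crossingsStep, he]]
      simp [offSigns, he, ih c]
    · rw [show crossingsStep (c, 0) e = (c, e) from by simp [crossingsStep, he]]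
      rw [foldA_nonzero t c e he]
      simp [offSigns, he]

-- ===== VERDICT (by name: the statement is the Claim_ definition above) =====
theorem crossings_spec : Claim_equal_crossings := by
  intro roadY bobX bobY _
  unfold Spec_crossings crossings crossings_alt
  rw [foldA_zero]
  rw [offSigns_eq_filterMap]
  simp
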